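-- pv_equiv track=rewrite | github.com/conglambaomat/hihi | CABTA/src/agent/observation_normalizer.py | _log_row_summary
-- ===== SOURCE A (Python) =====
-- from typing import Any, Dict, List, Optional
--
-- def _log_row_summary(row: Dict[str, Any], observation_type: str) -> str:
--     user = row.get("user") or row.get("username") or row.get("account")
--     host = row.get("host") or row.get("hostname") or row.get("device")
--     source_ip = row.get("source_ip") or row.get("src_ip") or row.get("client_ip")
--     dest_ip = row.get("dest_ip") or row.get("destination_ip") or row.get("remote_ip")
--     process_name = row.get("process_name") or row.get("process") or row.get("image")
--     session_id = row.get("session_id") or row.get("logon_id") or row.get("session")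
--     if observation_type == "auth_event":
--         parts = [f"user={user}" if user else "", f"host={host}" if host else "", f"session={session_id}" if session_id else "", f"source_ip={source_ip}" if source_ip else ""]
--         return "Auth telemetry: " + ", ".join(part for part in parts if part)
--     if observation_type == "process_event":
--         parts = [f"process={process_name}" if process_name else "", f"host={host}" if host else "", f"user={user}" if user else "", f"dest_ip={dest_ip}" if dest_ip else ""]
--         return "Process telemetry: " + ", ".join(part for part in parts if part)
--     if observation_type == "network_event":
--         parts = [f"host={host}" if host else "", f"user={user}" if user else "", f"dest_ip={dest_ip}" if dest_ip else "", f"domain={row.get('domain')}" if row.get("domain") else ""]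
--         return "Network telemetry: " + ", ".join(part for part in parts if part)
--     return "Host telemetry row observed."
-- ===== SOURCE B (Python) =====
-- # One pass over the row: each key is normalized through an alias->(field, priority)
-- # index, keeping the best-priority truthy value per canonical field; the summary is
-- # then emitted from the per-type field layout.
-- _ALIASES = {
--     "user": ("user", 0), "username": ("user", 1), "account": ("user", 2),
--     "host": ("host", 0), "hostname": ("host", 1), "device": ("host", 2),
--     "source_ip": ("source_ip", 0), "src_ip": ("source_ip", 1), "client_ip": ("source_ip", 2),
--     "dest_ip": ("dest_ip", 0), "destination_ip": ("dest_ip", 1), "remote_ip": ("dest_ip", 2),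
--     "process_name": ("process", 0), "process": ("process", 1), "image": ("process", 2),
--     "session_id": ("session", 0), "logon_id": ("session", 1), "session": ("session", 2),
--     "domain": ("domain", 0),
-- }
-- _LAYOUT = {
--     "auth_event": ("Auth telemetry: ", ["user", "host", "session", "source_ip"]),
--     "process_event": ("Process telemetry: ", ["process", "host", "user", "dest_ip"]),
--     "network_event": ("Network telemetry: ", ["host", "user", "dest_ip", "domain"]),
-- }
--
-- def _log_row_summary(row, observation_type):
--     spec = _LAYOUT.get(observation_type)
--     if spec is None:
--         return "Host telemetry row observed."
--     best = {}
--     for k, v in row.items():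
--         if v and k in _ALIASES:
--             f, p = _ALIASES[k]
--             if f not in best or p < best[f][0]:
--                 best[f] = (p, v)
--     prefix, fields = spec
--     return prefix + ", ".join(f + "=" + best[f][1] for f in fields if f in best)
-- ===== Notes on version B (the rewrite author's own statement) =====
-- stated objective: alternative
-- what changed: Instead of twelve per-field or-chained row.get lookups feeding three explicit branches, B makes a single pass over the row through an alias->(canonical field, priority) index, keeping the best-priority truthy value per canonical field, and then emits the per-type field layout from that table.
import Mathlib
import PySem

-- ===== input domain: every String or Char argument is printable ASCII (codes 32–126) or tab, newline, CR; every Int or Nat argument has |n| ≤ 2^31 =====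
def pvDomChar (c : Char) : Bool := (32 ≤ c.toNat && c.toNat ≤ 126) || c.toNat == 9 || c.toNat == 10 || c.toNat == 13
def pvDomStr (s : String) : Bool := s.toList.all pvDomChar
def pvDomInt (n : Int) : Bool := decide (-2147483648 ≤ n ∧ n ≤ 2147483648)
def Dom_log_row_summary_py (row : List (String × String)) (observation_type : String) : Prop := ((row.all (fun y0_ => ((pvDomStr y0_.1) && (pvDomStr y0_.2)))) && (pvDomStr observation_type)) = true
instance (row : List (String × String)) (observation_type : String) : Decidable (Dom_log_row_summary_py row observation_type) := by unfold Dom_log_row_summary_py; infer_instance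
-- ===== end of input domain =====

-- B replaces A's per-field or-chained lookups with a single pass over the row through an
-- alias→(field, priority) index, keeping the best-priority truthy value per canonical field
-- (objective: alternative algorithm, same cost on these small rows).

-- ===== PORT A =====
-- row.get(k): first match in the association list (dict convention); missing → none
def pvGet (row : List (String × String)) (k : String) : Option String :=
  row.lookup k

-- 'x or y' over string values where missing/None has collapsed to "" ("" is falsy)
def pvOr (a b : String) : String := if a = "" then b else a

def pvGetS (row : List (String × String)) (k : String) : String := (pvGet row k).getD ""

def log_row_summary_py (row : List (String × String)) (observation_type : String) : String :=
  let user := pvOr (pvGetS row "user") (pvOr (pvGetS row "username") (pvGetS row "account"))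
  let host := pvOr (pvGetS row "host") (pvOr (pvGetS row "hostname") (pvGetS row "device"))
  let source_ip := pvOr (pvGetS row "source_ip") (pvOr (pvGetS row "src_ip") (pvGetS row "client_ip"))
  let dest_ip := pvOr (pvGetS row "dest_ip") (pvOr (pvGetS row "destination_ip") (pvGetS row "remote_ip"))
  let process_name := pvOr (pvGetS row "process_name") (pvOr (pvGetS row "process") (pvGetS row "image"))
  let session_id := pvOr (pvGetS row "session_id") (pvOr (pvGetS row "logon_id") (pvGetS row "session"))
  if observation_type = "auth_event" then
    let parts := [if user ≠ "" then "user=" ++ user else "",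
                  if host ≠ "" then "host=" ++ host else "",
                  if session_id ≠ "" then "session=" ++ session_id else "",
                  if source_ip ≠ "" then "source_ip=" ++ source_ip else ""]
    "Auth telemetry: " ++ PySem.Str.join ", " (parts.filter (· ≠ ""))
  else if observation_type = "process_event" then
    let parts := [if process_name ≠ "" then "process=" ++ process_name else "",
                  if host ≠ "" then "host=" ++ host else "",
                  if user ≠ "" then "user=" ++ user else "",
                  if dest_ip ≠ "" then "dest_ip=" ++ dest_ip else ""]
    "Process telemetry: " ++ PySem.Str.join ", " (parts.filter (· ≠ ""))
  else if observation_type = "network_event" then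
    let parts := [if host ≠ "" then "host=" ++ host else "",
                  if user ≠ "" then "user=" ++ user else "",
                  if dest_ip ≠ "" then "dest_ip=" ++ dest_ip else "",
                  if pvGetS row "domain" ≠ "" then "domain=" ++ pvGetS row "domain" else ""]
    "Network telemetry: " ++ PySem.Str.join ", " (parts.filter (· ≠ ""))
  else
    "Host telemetry row observed."

-- ===== PORT B =====
-- _ALIASES[k]: alias key → (canonical field, priority); None when k not in the index
def pvAliasOf (k : String) : Option (String × Int) :=
  if k = "user" then some ("user", 0)
  else if k = "username" then some ("user", 1)
  else if k = "account" then some ("user", 2)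
  else if k = "host" then some ("host", 0)
  else if k = "hostname" then some ("host", 1)
  else if k = "device" then some ("host", 2)
  else if k = "source_ip" then some ("source_ip", 0)
  else if k = "src_ip" then some ("source_ip", 1)
  else if k = "client_ip" then some ("source_ip", 2)
  else if k = "dest_ip" then some ("dest_ip", 0)
  else if k = "destination_ip" then some ("dest_ip", 1)
  else if k = "remote_ip" then some ("dest_ip", 2)
  else if k = "process_name" then some ("process", 0)
  else if k = "process" then some ("process", 1)
  else if k = "image" then some ("process", 2)
  else if k = "session_id" then some ("session", 0)
  else if k = "logon_id" then some ("session", 1)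
  else if k = "session" then some ("session", 2)
  else if k = "domain" then some ("domain", 0)
  else none

-- _LAYOUT: observation_type → (prefix, ordered canonical fields)
def pvLayout : List (String × String × List String) :=
  [("auth_event", ("Auth telemetry: ", ["user", "host", "session", "source_ip"])),
   ("process_event", ("Process telemetry: ", ["process", "host", "user", "dest_ip"])),
   ("network_event", ("Network telemetry: ", ["host", "user", "dest_ip", "domain"]))]

-- loop body: if v and k in _ALIASES: f, p = _ALIASES[k]; if f not in best or p < best[f][0]: best[f] = (p, v)
def pvStep (d : PySem.Dict String (Int × String)) (kv : String × String) : PySem.Dict String (Int × String) :=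
  if kv.2 ≠ "" then
    match pvAliasOf kv.1 with
    | some (f, p) =>
      match d.get? f with
      | none => d.insert f (p, kv.2)
      | some (q, _) => if p < q then d.insert f (p, kv.2) else d
    | none => d
  else d

-- one step of the join generator: emit 'f=v' when field f was collected
def pvEmit (best : PySem.Dict String (Int × String)) (f : String) (acc : List String) : List String :=
  match best.get? f with
  | some (_, v) => (f ++ "=" ++ v) :: acc
  | none => acc

def log_row_summary_py_alt (row : List (String × String)) (observation_type : String) : String :=
  match pvLayout.lookup observation_type with
  | none => "Host telemetry row observed."
  | some (prefix_, fields) =>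
    let best := row.foldl pvStep PySem.Dict.empty
    prefix_ ++ PySem.Str.join ", " (fields.foldr (pvEmit best) [])

-- ===== PRECONDITION & SPEC =====
-- Pre_ excludes association lists with duplicate keys: a Python dict has unique keys, so such
-- lists represent no dict input; the first-match convention there is an arbitrary choice.
def Pre_log_row_summary_py (row : List (String × String)) (observation_type : String) : Prop :=
  (row.map Prod.fst).Nodup
instance (row : List (String × String)) (observation_type : String) : Decidable (Pre_log_row_summary_py row observation_type) := by unfold Pre_log_row_summary_py; infer_instance

def pvWitness_log_row_summary_py : (List (String × String)) × String :=
  ([("user", "alice"), ("hostname", "h1"), ("session", "s7")], "auth_event")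

def Spec_log_row_summary_py (row : List (String × String)) (observation_type : String) (out : String) : Prop := out = log_row_summary_py_alt row observation_type
instance (row : List (String × String)) (observation_type : String) (out : String) : Decidable (Spec_log_row_summary_py row observation_type out) := by unfold Spec_log_row_summary_py; infer_instance

-- ===== CLAIM (what is proved, stated in full; the proofs are below) =====
def Claim_equal_log_row_summary_py : Prop := ∀ (row : List (String × String)) (observation_type : String), Dom_log_row_summary_py row observation_type → Pre_log_row_summary_py row observation_type → Spec_log_row_summary_py row observation_type (log_row_summary_py row observation_type)

-- ===== LEMMAS AND PROOFS =====
-- per-field slot update: best[f] = (p, v) if f not in best or p < best[f][0]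
def updP (c : Option (Int × String)) (p : Int) (v : String) : Option (Int × String) :=
  match c with
  | none => some (p, v)
  | some (q, w) => if p < q then some (p, v) else some (q, w)

-- pvStep seen through the slot of one fixed field f
def fStep (f : String) (c : Option (Int × String)) (kv : String × String) : Option (Int × String) :=
  if kv.2 ≠ "" then
    match pvAliasOf kv.1 with
    | some (g, p) => if g = f then updP c p kv.2 else c
    | none => c
  else c

-- three-alias slot step, aliases a0 < a1 < a2 in priority
def tStep (a0 a1 a2 : String) (c : Option (Int × String)) (kv : String × String) : Option (Int × String) :=
  if kv.1 = a0 ∧ kv.2 ≠ "" then updP c 0 kv.2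
  else if kv.1 = a1 ∧ kv.2 ≠ "" then updP c 1 kv.2
  else if kv.1 = a2 ∧ kv.2 ≠ "" then updP c 2 kv.2
  else c

-- first truthy value stored under key a
def ft (row : List (String × String)) (a : String) : Option String :=
  match row with
  | [] => none
  | (k, v) :: t => if k = a ∧ v ≠ "" then some v else ft t a

theorem pvStep_get? (d : PySem.Dict String (Int × String)) (kv : String × String) (f : String) :
    (pvStep d kv).get? f = fStep f (d.get? f) kv := by
  unfold pvStep fStep
  by_cases hv : kv.2 ≠ "" <;> simp [hv]
  rcases hA : pvAliasOf kv.1 with _ | ⟨g, p⟩ <;> simp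
  by_cases hgf : g = f
  · subst hgf
    rcases hg : d.get? g with _ | ⟨q, w⟩ <;> simp [updP, hg]
    split_ifs <;> simp [hg]
  · rcases hg : d.get? g with _ | ⟨q, w⟩ <;>
      simp [PySem.Dict.get?_insert, hgf, Ne.symm hgf] <;>
      (split_ifs <;> simp [PySem.Dict.get?_insert, Ne.symm hgf])

theorem foldl_pvStep_get? (row : List (String × String)) (d : PySem.Dict String (Int × String)) (f : String) :
    (row.foldl pvStep d).get? f = row.foldl (fStep f) (d.get? f) := by
  induction row generalizing d with
  | nil => rfl
  | cons kv t ih => simp [List.foldl_cons, ih, pvStep_get?]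

theorem fStep_user : fStep "user" = tStep "user" "username" "account" := by
  funext c kv
  obtain ⟨k, v⟩ := kv
  by_cases hv : v = ""
  · simp [fStep, tStep, hv]
  · by_cases h0 : k = "user"
    · subst h0; simp [fStep, tStep, pvAliasOf, hv]
    · by_cases h1 : k = "username"
      · subst h1; simp [fStep, tStep, pvAliasOf, hv]
      · by_cases h2 : k = "account"
        · subst h2; simp [fStep, tStep, pvAliasOf, hv]
        · by_cases h3 : k = "host"
          · subst h3; simp [fStep, tStep, pvAliasOf, hv]
          · by_cases h4 : k = "hostname"
            · subst h4; simp [fStep, tStep, pvAliasOf, hv]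
            · by_cases h5 : k = "device"
              · subst h5; simp [fStep, tStep, pvAliasOf, hv]
              · by_cases h6 : k = "source_ip"
                · subst h6; simp [fStep, tStep, pvAliasOf, hv]
                · by_cases h7 : k = "src_ip"
                  · subst h7; simp [fStep, tStep, pvAliasOf, hv]
                  · by_cases h8 : k = "client_ip"
                    · subst h8; simp [fStep, tStep, pvAliasOf, hv]
                    · by_cases h9 : k = "dest_ip"
                      · subst h9; simp [fStep, tStep, pvAliasOf, hv]
                      · by_cases h10 : k = "destination_ip"
                        · subst h10; simp [fStep, tStep, pvAliasOf, hv]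
                        · by_cases h11 : k = "remote_ip"
                          · subst h11; simp [fStep, tStep, pvAliasOf, hv]
                          · by_cases h12 : k = "process_name"
                            · subst h12; simp [fStep, tStep, pvAliasOf, hv]
                            · by_cases h13 : k = "process"
                              · subst h13; simp [fStep, tStep, pvAliasOf, hv]
                              · by_cases h14 : k = "image"
                                · subst h14; simp [fStep, tStep, pvAliasOf, hv]
                                · by_cases h15 : k = "session_id"
                                  · subst h15; simp [fStep, tStep, pvAliasOf, hv]
                                  · by_cases h16 : k = "logon_id"
                                    · subst h16; simp [fStep, tStep, pvAliasOf, hv]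
                                    · by_cases h17 : k = "session"
                                      · subst h17; simp [fStep, tStep, pvAliasOf, hv]
                                      · by_cases h18 : k = "domain"
                                        · subst h18; simp [fStep, tStep, pvAliasOf, hv]
                                        · simp [fStep, tStep, pvAliasOf, hv, h0, h1, h2, h3, h4, h5, h6, h7, h8, h9, h10, h11, h12, h13, h14, h15, h16, h17, h18]

theorem fStep_host : fStep "host" = tStep "host" "hostname" "device" := by
  funext c kv
  obtain ⟨k, v⟩ := kv
  by_cases hv : v = ""
  · simp [fStep, tStep, hv]
  · by_cases h0 : k = "user"
    · subst h0; simp [fStep, tStep, pvAliasOf, hv]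
    · by_cases h1 : k = "username"
      · subst h1; simp [fStep, tStep, pvAliasOf, hv]
      · by_cases h2 : k = "account"
        · subst h2; simp [fStep, tStep, pvAliasOf, hv]
        · by_cases h3 : k = "host"
          · subst h3; simp [fStep, tStep, pvAliasOf, hv]
          · by_cases h4 : k = "hostname"
            · subst h4; simp [fStep, tStep, pvAliasOf, hv]
            · by_cases h5 : k = "device"
              · subst h5; simp [fStep, tStep, pvAliasOf, hv]
              · by_cases h6 : k = "source_ip"
                · subst h6; simp [fStep, tStep, pvAliasOf, hv]
                · by_cases h7 : k = "src_ip"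
                  · subst h7; simp [fStep, tStep, pvAliasOf, hv]
                  · by_cases h8 : k = "client_ip"
                    · subst h8; simp [fStep, tStep, pvAliasOf, hv]
                    · by_cases h9 : k = "dest_ip"
                      · subst h9; simp [fStep, tStep, pvAliasOf, hv]
                      · by_cases h10 : k = "destination_ip"
                        · subst h10; simp [fStep, tStep, pvAliasOf, hv]
                        · by_cases h11 : k = "remote_ip"
                          · subst h11; simp [fStep, tStep, pvAliasOf, hv]
                          · by_cases h12 : k = "process_name"
                            · subst h12; simp [fStep, tStep, pvAliasOf, hv]
                            · by_cases h13 : k = "process"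
                              · subst h13; simp [fStep, tStep, pvAliasOf, hv]
                              · by_cases h14 : k = "image"
                                · subst h14; simp [fStep, tStep, pvAliasOf, hv]
                                · by_cases h15 : k = "session_id"
                                  · subst h15; simp [fStep, tStep, pvAliasOf, hv]
                                  · by_cases h16 : k = "logon_id"
                                    · subst h16; simp [fStep, tStep, pvAliasOf, hv]
                                    · by_cases h17 : k = "session"
                                      · subst h17; simp [fStep, tStep, pvAliasOf, hv]
                                      · by_cases h18 : k = "domain"
                                        · subst h18; simp [fStep, tStep, pvAliasOf, hv]
                                        · simp [fStep, tStep, pvAliasOf, hv, h0, h1, h2, h3, h4, h5, h6, h7, h8, h9, h10, h11, h12, h13, h14, h15, h16, h17, h18]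

theorem fStep_source : fStep "source_ip" = tStep "source_ip" "src_ip" "client_ip" := by
  funext c kv
  obtain ⟨k, v⟩ := kv
  by_cases hv : v = ""
  · simp [fStep, tStep, hv]
  · by_cases h0 : k = "user"
    · subst h0; simp [fStep, tStep, pvAliasOf, hv]
    · by_cases h1 : k = "username"
      · subst h1; simp [fStep, tStep, pvAliasOf, hv]
      · by_cases h2 : k = "account"
        · subst h2; simp [fStep, tStep, pvAliasOf, hv]
        · by_cases h3 : k = "host"
          · subst h3; simp [fStep, tStep, pvAliasOf, hv]
          · by_cases h4 : k = "hostname"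
            · subst h4; simp [fStep, tStep, pvAliasOf, hv]
            · by_cases h5 : k = "device"
              · subst h5; simp [fStep, tStep, pvAliasOf, hv]
              · by_cases h6 : k = "source_ip"
                · subst h6; simp [fStep, tStep, pvAliasOf, hv]
                · by_cases h7 : k = "src_ip"
                  · subst h7; simp [fStep, tStep, pvAliasOf, hv]
                  · by_cases h8 : k = "client_ip"
                    · subst h8; simp [fStep, tStep, pvAliasOf, hv]
                    · by_cases h9 : k = "dest_ip"
                      · subst h9; simp [fStep, tStep, pvAliasOf, hv]
                      · by_cases h10 : k = "destination_ip"
                        · subst h10; simp [fStep, tStep, pvAliasOf, hv]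
                        · by_cases h11 : k = "remote_ip"
                          · subst h11; simp [fStep, tStep, pvAliasOf, hv]
                          · by_cases h12 : k = "process_name"
                            · subst h12; simp [fStep, tStep, pvAliasOf, hv]
                            · by_cases h13 : k = "process"
                              · subst h13; simp [fStep, tStep, pvAliasOf, hv]
                              · by_cases h14 : k = "image"
                                · subst h14; simp [fStep, tStep, pvAliasOf, hv]
                                · by_cases h15 : k = "session_id"
                                  · subst h15; simp [fStep, tStep, pvAliasOf, hv]
                                  · by_cases h16 : k = "logon_id"
                                    · subst h16; simp [fStep, tStep, pvAliasOf, hv]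
                                    · by_cases h17 : k = "session"
                                      · subst h17; simp [fStep, tStep, pvAliasOf, hv]
                                      · by_cases h18 : k = "domain"
                                        · subst h18; simp [fStep, tStep, pvAliasOf, hv]
                                        · simp [fStep, tStep, pvAliasOf, hv, h0, h1, h2, h3, h4, h5, h6, h7, h8, h9, h10, h11, h12, h13, h14, h15, h16, h17, h18]

theorem fStep_dest : fStep "dest_ip" = tStep "dest_ip" "destination_ip" "remote_ip" := by
  funext c kv
  obtain ⟨k, v⟩ := kv
  by_cases hv : v = ""
  · simp [fStep, tStep, hv]
  · by_cases h0 : k = "user"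
    · subst h0; simp [fStep, tStep, pvAliasOf, hv]
    · by_cases h1 : k = "username"
      · subst h1; simp [fStep, tStep, pvAliasOf, hv]
      · by_cases h2 : k = "account"
        · subst h2; simp [fStep, tStep, pvAliasOf, hv]
        · by_cases h3 : k = "host"
          · subst h3; simp [fStep, tStep, pvAliasOf, hv]
          · by_cases h4 : k = "hostname"
            · subst h4; simp [fStep, tStep, pvAliasOf, hv]
            · by_cases h5 : k = "device"
              · subst h5; simp [fStep, tStep, pvAliasOf, hv]
              · by_cases h6 : k = "source_ip"
                · subst h6; simp [fStep, tStep, pvAliasOf, hv]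
                · by_cases h7 : k = "src_ip"
                  · subst h7; simp [fStep, tStep, pvAliasOf, hv]
                  · by_cases h8 : k = "client_ip"
                    · subst h8; simp [fStep, tStep, pvAliasOf, hv]
                    · by_cases h9 : k = "dest_ip"
                      · subst h9; simp [fStep, tStep, pvAliasOf, hv]
                      · by_cases h10 : k = "destination_ip"
                        · subst h10; simp [fStep, tStep, pvAliasOf, hv]
                        · by_cases h11 : k = "remote_ip"
                          · subst h11; simp [fStep, tStep, pvAliasOf, hv]
                          · by_cases h12 : k = "process_name"
                            · subst h12; simp [fStep, tStep, pvAliasOf, hv]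
                            · by_cases h13 : k = "process"
                              · subst h13; simp [fStep, tStep, pvAliasOf, hv]
                              · by_cases h14 : k = "image"
                                · subst h14; simp [fStep, tStep, pvAliasOf, hv]
                                · by_cases h15 : k = "session_id"
                                  · subst h15; simp [fStep, tStep, pvAliasOf, hv]
                                  · by_cases h16 : k = "logon_id"
                                    · subst h16; simp [fStep, tStep, pvAliasOf, hv]
                                    · by_cases h17 : k = "session"
                                      · subst h17; simp [fStep, tStep, pvAliasOf, hv]
                                      · by_cases h18 : k = "domain"
                                        · subst h18; simp [fStep, tStep, pvAliasOf, hv]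
                                        · simp [fStep, tStep, pvAliasOf, hv, h0, h1, h2, h3, h4, h5, h6, h7, h8, h9, h10, h11, h12, h13, h14, h15, h16, h17, h18]

theorem fStep_process : fStep "process" = tStep "process_name" "process" "image" := by
  funext c kv
  obtain ⟨k, v⟩ := kv
  by_cases hv : v = ""
  · simp [fStep, tStep, hv]
  · by_cases h0 : k = "user"
    · subst h0; simp [fStep, tStep, pvAliasOf, hv]
    · by_cases h1 : k = "username"
      · subst h1; simp [fStep, tStep, pvAliasOf, hv]
      · by_cases h2 : k = "account"
        · subst h2; simp [fStep, tStep, pvAliasOf, hv]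
        · by_cases h3 : k = "host"
          · subst h3; simp [fStep, tStep, pvAliasOf, hv]
          · by_cases h4 : k = "hostname"
            · subst h4; simp [fStep, tStep, pvAliasOf, hv]
            · by_cases h5 : k = "device"
              · subst h5; simp [fStep, tStep, pvAliasOf, hv]
              · by_cases h6 : k = "source_ip"
                · subst h6; simp [fStep, tStep, pvAliasOf, hv]
                · by_cases h7 : k = "src_ip"
                  · subst h7; simp [fStep, tStep, pvAliasOf, hv]
                  · by_cases h8 : k = "client_ip"
                    · subst h8; simp [fStep, tStep, pvAliasOf, hv]
                    · by_cases h9 : k = "dest_ip"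
                      · subst h9; simp [fStep, tStep, pvAliasOf, hv]
                      · by_cases h10 : k = "destination_ip"
                        · subst h10; simp [fStep, tStep, pvAliasOf, hv]
                        · by_cases h11 : k = "remote_ip"
                          · subst h11; simp [fStep, tStep, pvAliasOf, hv]
                          · by_cases h12 : k = "process_name"
                            · subst h12; simp [fStep, tStep, pvAliasOf, hv]
                            · by_cases h13 : k = "process"
                              · subst h13; simp [fStep, tStep, pvAliasOf, hv]
                              · by_cases h14 : k = "image"
                                · subst h14; simp [fStep, tStep, pvAliasOf, hv]
                                · by_cases h15 : k = "session_id"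
                                  · subst h15; simp [fStep, tStep, pvAliasOf, hv]
                                  · by_cases h16 : k = "logon_id"
                                    · subst h16; simp [fStep, tStep, pvAliasOf, hv]
                                    · by_cases h17 : k = "session"
                                      · subst h17; simp [fStep, tStep, pvAliasOf, hv]
                                      · by_cases h18 : k = "domain"
                                        · subst h18; simp [fStep, tStep, pvAliasOf, hv]
                                        · simp [fStep, tStep, pvAliasOf, hv, h0, h1, h2, h3, h4, h5, h6, h7, h8, h9, h10, h11, h12, h13, h14, h15, h16, h17, h18]

theorem fStep_session : fStep "session" = tStep "session_id" "logon_id" "session" := by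
  funext c kv
  obtain ⟨k, v⟩ := kv
  by_cases hv : v = ""
  · simp [fStep, tStep, hv]
  · by_cases h0 : k = "user"
    · subst h0; simp [fStep, tStep, pvAliasOf, hv]
    · by_cases h1 : k = "username"
      · subst h1; simp [fStep, tStep, pvAliasOf, hv]
      · by_cases h2 : k = "account"
        · subst h2; simp [fStep, tStep, pvAliasOf, hv]
        · by_cases h3 : k = "host"
          · subst h3; simp [fStep, tStep, pvAliasOf, hv]
          · by_cases h4 : k = "hostname"
            · subst h4; simp [fStep, tStep, pvAliasOf, hv]
            · by_cases h5 : k = "device"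
              · subst h5; simp [fStep, tStep, pvAliasOf, hv]
              · by_cases h6 : k = "source_ip"
                · subst h6; simp [fStep, tStep, pvAliasOf, hv]
                · by_cases h7 : k = "src_ip"
                  · subst h7; simp [fStep, tStep, pvAliasOf, hv]
                  · by_cases h8 : k = "client_ip"
                    · subst h8; simp [fStep, tStep, pvAliasOf, hv]
                    · by_cases h9 : k = "dest_ip"
                      · subst h9; simp [fStep, tStep, pvAliasOf, hv]
                      · by_cases h10 : k = "destination_ip"
                        · subst h10; simp [fStep, tStep, pvAliasOf, hv]
                        · by_cases h11 : k = "remote_ip"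
                          · subst h11; simp [fStep, tStep, pvAliasOf, hv]
                          · by_cases h12 : k = "process_name"
                            · subst h12; simp [fStep, tStep, pvAliasOf, hv]
                            · by_cases h13 : k = "process"
                              · subst h13; simp [fStep, tStep, pvAliasOf, hv]
                              · by_cases h14 : k = "image"
                                · subst h14; simp [fStep, tStep, pvAliasOf, hv]
                                · by_cases h15 : k = "session_id"
                                  · subst h15; simp [fStep, tStep, pvAliasOf, hv]
                                  · by_cases h16 : k = "logon_id"
                                    · subst h16; simp [fStep, tStep, pvAliasOf, hv]
                                    · by_cases h17 : k = "session"
                                      · subst h17; simp [fStep, tStep, pvAliasOf, hv]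
                                      · by_cases h18 : k = "domain"
                                        · subst h18; simp [fStep, tStep, pvAliasOf, hv]
                                        · simp [fStep, tStep, pvAliasOf, hv, h0, h1, h2, h3, h4, h5, h6, h7, h8, h9, h10, h11, h12, h13, h14, h15, h16, h17, h18]

theorem fStep_domain : fStep "domain" = tStep "domain" "domain" "domain" := by
  funext c kv
  obtain ⟨k, v⟩ := kv
  by_cases hv : v = ""
  · simp [fStep, tStep, hv]
  · by_cases h0 : k = "user"
    · subst h0; simp [fStep, tStep, pvAliasOf, hv]
    · by_cases h1 : k = "username"
      · subst h1; simp [fStep, tStep, pvAliasOf, hv]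
      · by_cases h2 : k = "account"
        · subst h2; simp [fStep, tStep, pvAliasOf, hv]
        · by_cases h3 : k = "host"
          · subst h3; simp [fStep, tStep, pvAliasOf, hv]
          · by_cases h4 : k = "hostname"
            · subst h4; simp [fStep, tStep, pvAliasOf, hv]
            · by_cases h5 : k = "device"
              · subst h5; simp [fStep, tStep, pvAliasOf, hv]
              · by_cases h6 : k = "source_ip"
                · subst h6; simp [fStep, tStep, pvAliasOf, hv]
                · by_cases h7 : k = "src_ip"
                  · subst h7; simp [fStep, tStep, pvAliasOf, hv]
                  · by_cases h8 : k = "client_ip"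
                    · subst h8; simp [fStep, tStep, pvAliasOf, hv]
                    · by_cases h9 : k = "dest_ip"
                      · subst h9; simp [fStep, tStep, pvAliasOf, hv]
                      · by_cases h10 : k = "destination_ip"
                        · subst h10; simp [fStep, tStep, pvAliasOf, hv]
                        · by_cases h11 : k = "remote_ip"
                          · subst h11; simp [fStep, tStep, pvAliasOf, hv]
                          · by_cases h12 : k = "process_name"
                            · subst h12; simp [fStep, tStep, pvAliasOf, hv]
                            · by_cases h13 : k = "process"
                              · subst h13; simp [fStep, tStep, pvAliasOf, hv]
                              · by_cases h14 : k = "image"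
                                · subst h14; simp [fStep, tStep, pvAliasOf, hv]
                                · by_cases h15 : k = "session_id"
                                  · subst h15; simp [fStep, tStep, pvAliasOf, hv]
                                  · by_cases h16 : k = "logon_id"
                                    · subst h16; simp [fStep, tStep, pvAliasOf, hv]
                                    · by_cases h17 : k = "session"
                                      · subst h17; simp [fStep, tStep, pvAliasOf, hv]
                                      · by_cases h18 : k = "domain"
                                        · subst h18; simp [fStep, tStep, pvAliasOf, hv]
                                        · simp [fStep, tStep, pvAliasOf, hv, h0, h1, h2, h3, h4, h5, h6, h7, h8, h9, h10, h11, h12, h13, h14, h15, h16, h17, h18]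

theorem tFold_p0 (a0 a1 a2 : String) (w : String) (row : List (String × String)) :
    row.foldl (tStep a0 a1 a2) (some (0, w)) = some (0, w) := by
  induction row with
  | nil => rfl
  | cons kv t ih =>
    simp only [List.foldl_cons, tStep, updP]
    split_ifs <;> first | exact ih | simp_all

theorem tFold_p1 (a0 a1 a2 : String) (w : String) (row : List (String × String)) :
    row.foldl (tStep a0 a1 a2) (some (1, w)) =
      match ft row a0 with
      | some u => some (0, u)
      | none => some (1, w) := by
  induction row with
  | nil => rfl
  | cons kv t ih =>
    simp only [List.foldl_cons, tStep, updP, ft]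
    split_ifs with h1 h2 h3 <;> simp_all [tFold_p0]

theorem tFold_p2 (a0 a1 a2 : String) (w : String) (row : List (String × String)) :
    row.foldl (tStep a0 a1 a2) (some (2, w)) =
      match ft row a0 with
      | some u => some (0, u)
      | none =>
        match ft row a1 with
        | some u => some (1, u)
        | none => some (2, w) := by
  induction row with
  | nil => rfl
  | cons kv t ih =>
    simp only [List.foldl_cons, tStep, updP, ft]
    split_ifs with h1 h2 h3 <;> simp_all [tFold_p0, tFold_p1]

theorem tFold_none (a0 a1 a2 : String) (row : List (String × String)) :
    row.foldl (tStep a0 a1 a2) none =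
      match ft row a0 with
      | some u => some ((0 : Int), u)
      | none =>
        match ft row a1 with
        | some u => some (1, u)
        | none =>
          match ft row a2 with
          | some u => some (2, u)
          | none => none := by
  induction row with
  | nil => rfl
  | cons kv t ih =>
    simp only [List.foldl_cons, tStep, updP, ft]
    split_ifs with h1 h2 h3 <;> simp_all [tFold_p0, tFold_p1, tFold_p2]

theorem ft_of_not_mem (row : List (String × String)) (a : String) (h : a ∉ row.map Prod.fst) :
    ft row a = none := by
  induction row with
  | nil => rfl
  | cons kv t ih =>
    simp only [List.map_cons, List.mem_cons] at h
    push Not at h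
    simp [ft, Ne.symm h.1, ih h.2]

-- under unique keys, the first truthy occurrence is the lookup when truthy
theorem ft_eq_getS (row : List (String × String)) (a : String) (h : (row.map Prod.fst).Nodup) :
    ft row a = if pvGetS row a ≠ "" then some (pvGetS row a) else none := by
  induction row with
  | nil => simp [ft, pvGetS, pvGet]
  | cons kv t ih =>
    simp only [List.map_cons, List.nodup_cons] at h
    by_cases hk : kv.1 = a
    · subst hk
      by_cases hv : kv.2 = "" <;>
        simp [ft, pvGetS, pvGet, List.lookup, hv, ft_of_not_mem t kv.1 h.1]
    · simp [ft, pvGetS, pvGet, List.lookup, hk, beq_eq_false_iff_ne.mpr (fun e => hk e.symm), ih h.2]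

-- the per-field slot of the fold, written through the or-chain value
theorem slot_eq (row : List (String × String)) (h : (row.map Prod.fst).Nodup)
    (f a0 a1 a2 : String) (hstep : fStep f = tStep a0 a1 a2) :
    ((row.foldl pvStep PySem.Dict.empty).get? f) =
      (if pvGetS row a0 ≠ "" then some ((0 : Int), pvGetS row a0)
       else if pvGetS row a1 ≠ "" then some (1, pvGetS row a1)
       else if pvGetS row a2 ≠ "" then some (2, pvGetS row a2)
       else none) := by
  rw [foldl_pvStep_get?, PySem.Dict.get?_empty, hstep, tFold_none,
      ft_eq_getS row a0 h, ft_eq_getS row a1 h, ft_eq_getS row a2 h]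
  split_ifs <;> rfl

theorem label_ne_empty (s v : String) (h : s ≠ "") : s ++ v ≠ "" := by
  intro hc
  apply h
  have hl : (s ++ v).toList = ("" : String).toList := by rw [hc]
  simp at hl
  exact hl.1

-- one emitted field against one ternary part of A
theorem pvEmit_eq (best : PySem.Dict String (Int × String)) (f g0 g1 g2 : String) (acc : List String)
    (h : best.get? f = (if g0 ≠ "" then some ((0 : Int), g0)
                        else if g1 ≠ "" then some (1, g1)
                        else if g2 ≠ "" then some (2, g2)
                        else none)) :
    pvEmit best f acc =
      (if pvOr g0 (pvOr g1 g2) ≠ "" then (f ++ "=" ++ pvOr g0 (pvOr g1 g2)) :: acc else acc) := by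
  unfold pvEmit
  rw [h]
  by_cases e0 : g0 = "" <;> by_cases e1 : g1 = "" <;> by_cases e2 : g2 = "" <;>
    simp [e0, e1, e2, pvOr]

theorem filter_if_cons (c : Prop) [Decidable c] (s : String) (hs : s ≠ "") (rest : List String) :
    List.filter (fun x => x ≠ "") ((if c then s else "") :: rest) =
      (if c then s :: List.filter (fun x => x ≠ "") rest else List.filter (fun x => x ≠ "") rest) := by
  split_ifs with h <;> simp [List.filter, hs]

theorem pvOr_idem (a : String) : pvOr a (pvOr a a) = a := by
  unfold pvOr; split_ifs <;> simp_all

-- ===== VERDICT (by name: the statement is the Claim_ definition above) =====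
theorem log_row_summary_py_spec : Claim_equal_log_row_summary_py := by
  intro row ot _ hpre
  show log_row_summary_py row ot = log_row_summary_py_alt row ot
  have hu := slot_eq row hpre "user" "user" "username" "account" fStep_user
  have hh := slot_eq row hpre "host" "host" "hostname" "device" fStep_host
  have hs := slot_eq row hpre "source_ip" "source_ip" "src_ip" "client_ip" fStep_source
  have hd := slot_eq row hpre "dest_ip" "dest_ip" "destination_ip" "remote_ip" fStep_dest
  have hp := slot_eq row hpre "process" "process_name" "process" "image" fStep_process
  have hse := slot_eq row hpre "session" "session_id" "logon_id" "session" fStep_session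
  have hdo := slot_eq row hpre "domain" "domain" "domain" "domain" fStep_domain
  by_cases h1 : ot = "auth_event"
  · subst h1
    have hB : log_row_summary_py_alt row "auth_event" =
        "Auth telemetry: " ++ PySem.Str.join ", "
          (pvEmit (row.foldl pvStep PySem.Dict.empty) "user"
            (pvEmit (row.foldl pvStep PySem.Dict.empty) "host"
              (pvEmit (row.foldl pvStep PySem.Dict.empty) "session"
                (pvEmit (row.foldl pvStep PySem.Dict.empty) "source_ip" [])))) := rfl
    rw [hB, pvEmit_eq _ _ _ _ _ _ hu, pvEmit_eq _ _ _ _ _ _ hh,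
        pvEmit_eq _ _ _ _ _ _ hse, pvEmit_eq _ _ _ _ _ _ hs]
    simp only [log_row_summary_py]
    rw [if_pos (by trivial)]
    rw [filter_if_cons _ _ (label_ne_empty "user=" _ (by decide)),
        filter_if_cons _ _ (label_ne_empty "host=" _ (by decide)),
        filter_if_cons _ _ (label_ne_empty "session=" _ (by decide)),
        filter_if_cons _ _ (label_ne_empty "source_ip=" _ (by decide))]
    simp only [List.filter_nil, show ("user" : String) ++ "=" = "user=" from rfl,
      show ("host" : String) ++ "=" = "host=" from rfl,
      show ("session" : String) ++ "=" = "session=" from rfl,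
      show ("source_ip" : String) ++ "=" = "source_ip=" from rfl]
  · by_cases h2 : ot = "process_event"
    · subst h2
      have hB : log_row_summary_py_alt row "process_event" =
          "Process telemetry: " ++ PySem.Str.join ", "
            (pvEmit (row.foldl pvStep PySem.Dict.empty) "process"
              (pvEmit (row.foldl pvStep PySem.Dict.empty) "host"
                (pvEmit (row.foldl pvStep PySem.Dict.empty) "user"
                  (pvEmit (row.foldl pvStep PySem.Dict.empty) "dest_ip" [])))) := rfl
      rw [hB, pvEmit_eq _ _ _ _ _ _ hp, pvEmit_eq _ _ _ _ _ _ hh,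
          pvEmit_eq _ _ _ _ _ _ hu, pvEmit_eq _ _ _ _ _ _ hd]
      simp only [log_row_summary_py]
      rw [if_neg (by decide), if_pos (by trivial)]
      rw [filter_if_cons _ _ (label_ne_empty "process=" _ (by decide)),
          filter_if_cons _ _ (label_ne_empty "host=" _ (by decide)),
          filter_if_cons _ _ (label_ne_empty "user=" _ (by decide)),
          filter_if_cons _ _ (label_ne_empty "dest_ip=" _ (by decide))]
      simp only [List.filter_nil, show ("process" : String) ++ "=" = "process=" from rfl,
        show ("host" : String) ++ "=" = "host=" from rfl,
        show ("user" : String) ++ "=" = "user=" from rfl,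
        show ("dest_ip" : String) ++ "=" = "dest_ip=" from rfl]
    · by_cases h3 : ot = "network_event"
      · subst h3
        have hB : log_row_summary_py_alt row "network_event" =
            "Network telemetry: " ++ PySem.Str.join ", "
              (pvEmit (row.foldl pvStep PySem.Dict.empty) "host"
                (pvEmit (row.foldl pvStep PySem.Dict.empty) "user"
                  (pvEmit (row.foldl pvStep PySem.Dict.empty) "dest_ip"
                    (pvEmit (row.foldl pvStep PySem.Dict.empty) "domain" [])))) := rfl
        rw [hB, pvEmit_eq _ _ _ _ _ _ hh, pvEmit_eq _ _ _ _ _ _ hu,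
            pvEmit_eq _ _ _ _ _ _ hd, pvEmit_eq _ _ _ _ _ _ hdo]
        simp only [log_row_summary_py]
        rw [if_neg (by decide), if_neg (by decide), if_pos (by trivial)]
        rw [filter_if_cons _ _ (label_ne_empty "host=" _ (by decide)),
            filter_if_cons _ _ (label_ne_empty "user=" _ (by decide)),
            filter_if_cons _ _ (label_ne_empty "dest_ip=" _ (by decide)),
            filter_if_cons _ _ (label_ne_empty "domain=" _ (by decide))]
        simp only [List.filter_nil, pvOr_idem, show ("host" : String) ++ "=" = "host=" from rfl,
          show ("user" : String) ++ "=" = "user=" from rfl,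
          show ("dest_ip" : String) ++ "=" = "dest_ip=" from rfl,
          show ("domain" : String) ++ "=" = "domain=" from rfl]
      · have hB : log_row_summary_py_alt row ot = "Host telemetry row observed." := by
          have hL : pvLayout.lookup ot = none := by
            simp [pvLayout, List.lookup, beq_eq_false_iff_ne.mpr h1,
              beq_eq_false_iff_ne.mpr h2, beq_eq_false_iff_ne.mpr h3]
          unfold log_row_summary_py_alt
          rw [hL]
        rw [hB]
        simp only [log_row_summary_py]
        rw [if_neg h1, if_neg h2, if_neg h3]
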